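-- pv_equiv track=rewrite | github.com/kimevanjunseok/TIL | problems/SWExpertAcademy/Programming_Advanced/Start/이진수.py | binmaker
-- ===== SOURCE A (Python) =====
-- def binmaker(N):
--     D = {
--         'A': 10,
--         'B': 11,
--         'C': 12,
--         'D': 13,
--         'E': 14,
--         'F': 15,
--     }
--     if N in ['A', 'B', 'C', 'D', 'E', 'F']:
--         N = D[N]
--     else:
--         N = int(N)
--
--     S = ['0', '0', '0', '0']
--     for i in range(3, -1, -1):
--         S[i] = str(N%2)
--         N = N // 2
--     return "".join(S)
-- ===== SOURCE B (Python) =====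
-- def binmaker(N):
--     D = {
--         'A': 10,
--         'B': 11,
--         'C': 12,
--         'D': 13,
--         'E': 14,
--         'F': 15,
--     }
--     if N in ['A', 'B', 'C', 'D', 'E', 'F']:
--         N = D[N]
--     else:
--         N = int(N)
--     return format(N & 15, '04b')
-- ===== Notes on version B (the rewrite author's own statement) =====
-- stated objective: idiomatic
-- what changed: Keeps the same hex-digit parsing block but replaces the 4-iteration mod-2/floor-div-2 loop that mutates a list cell by cell with a single closed-form 4-bit binary format call on N masked to its low 4 bits.
import Mathlib
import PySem

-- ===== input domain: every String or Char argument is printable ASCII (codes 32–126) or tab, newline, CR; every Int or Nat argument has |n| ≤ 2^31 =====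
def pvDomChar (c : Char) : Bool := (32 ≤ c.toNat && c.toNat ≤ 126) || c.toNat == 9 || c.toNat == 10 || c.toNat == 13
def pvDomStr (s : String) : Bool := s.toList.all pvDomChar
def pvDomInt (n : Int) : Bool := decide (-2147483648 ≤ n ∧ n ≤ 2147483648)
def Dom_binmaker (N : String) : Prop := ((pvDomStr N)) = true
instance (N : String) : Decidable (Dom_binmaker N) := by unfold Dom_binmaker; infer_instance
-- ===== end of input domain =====

-- B replaces A's 4-iteration %2 / //2 list-filling loop with the closed-form format(N & 15, '04b'); same parsing, same result.

-- ===== PORT A =====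
-- the loop: S = ['0','0','0','0']; for i in range(3,-1,-1): S[i] = str(N%2); N = N//2; return "".join(S)
def pvLoopA (n : Int) : String :=
  PySem.Str.join "" ((PySem.List.pyRange 3 (-1) (-1)).foldl
    (fun (st : List String × Int) i =>
      (PySem.List.pySetD st.1 i (PySem.Int.toStr (PySem.Int.mod st.2 2)), PySem.Int.floordiv st.2 2))
    (["0", "0", "0", "0"], n)).1

def binmaker (N : String) : String :=
  pvLoopA
    (if N ∈ ["A", "B", "C", "D", "E", "F"] then
      (PySem.Dict.ofList [("A", (10 : Int)), ("B", 11), ("C", 12), ("D", 13), ("E", 14), ("F", 15)]).getD N 0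
      -- D[N]: the key is present under the guard, so KeyError is impossible and the default is never used
    else (PySem.Int.ofStr? N).getD 0)  -- int(N); the none case (ValueError) is excluded by Pre_binmaker

-- ===== PORT B =====
-- format(m, '04b') for 0 ≤ m < 16: binary digit k of m (bit 3 first)
def pvBit (m : Int) (k : Nat) : Char :=
  if PySem.Int.mod (PySem.Int.floordiv m ((2 : Int) ^ k)) 2 = 1 then '1' else '0'

-- n & 15: for the positive power-of-two mask, Python's bitwise AND is exactly n mod 16 (floor mod)
def pvFmtB (n : Int) : String :=
  String.mk [pvBit (PySem.Int.mod n 16) 3, pvBit (PySem.Int.mod n 16) 2,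
             pvBit (PySem.Int.mod n 16) 1, pvBit (PySem.Int.mod n 16) 0]

def binmaker_alt (N : String) : String :=
  pvFmtB
    (if N ∈ ["A", "B", "C", "D", "E", "F"] then
      (PySem.Dict.ofList [("A", (10 : Int)), ("B", 11), ("C", 12), ("D", 13), ("E", 14), ("F", 15)]).getD N 0
    else (PySem.Int.ofStr? N).getD 0)

-- ===== PRECONDITION & SPEC =====
-- Pre_ excludes exactly the inputs where A's int(N) raises ValueError (N neither an A–F digit nor an int literal)
def Pre_binmaker (N : String) : Prop :=
  N ∈ ["A", "B", "C", "D", "E", "F"] ∨ (PySem.Int.ofStr? N).isSome = true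
instance (N : String) : Decidable (Pre_binmaker N) := by unfold Pre_binmaker; infer_instance
def pvWitness_binmaker : String := "7"

def Spec_binmaker (N : String) (out : String) : Prop := out = binmaker_alt N
instance (N : String) (out : String) : Decidable (Spec_binmaker N out) := by unfold Spec_binmaker; infer_instance

-- ===== CLAIM (what is proved, stated in full; the proofs are below) =====
def Claim_equal_binmaker : Prop := ∀ (N : String), Dom_binmaker N → Pre_binmaker N → Spec_binmaker N (binmaker N)

-- ===== LEMMAS AND PROOFS =====
theorem pvLoop_eq_fmt (n : Int) : pvLoopA n = pvFmtB n := by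
  have hm2 : ∀ a : Int, PySem.Int.mod a 2 = a % 2 :=
    fun a => PySem.Int.mod_eq_emod_of_pos (by norm_num)
  have hm16 : ∀ a : Int, PySem.Int.mod a 16 = a % 16 :=
    fun a => PySem.Int.mod_eq_emod_of_pos (by norm_num)
  have hd : ∀ (a b : Int), 0 < b → PySem.Int.floordiv a b = a / b :=
    fun a b h => PySem.Int.floordiv_eq_ediv_of_pos h
  have hr : PySem.List.pyRange 3 (-1) (-1) = [3, 2, 1, 0] := by decide
  unfold pvLoopA pvFmtB pvBit
  rw [hr]
  simp only [List.foldl, hm2, hm16, hd _ _ (by norm_num : (0 : Int) < 2)]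
  norm_num [PySem.List.pySetD, PySem.List.pySet?, PySem.List.pyIdx?, Int.toNat, List.set]
  have e3 : n / 2 / 2 / 2 % 2 = n % 16 / 8 % 2 := by omega
  have e2 : n / 2 / 2 % 2 = n % 16 / 4 % 2 := by omega
  have e1 : n / 2 % 2 = n % 16 / 2 % 2 := by omega
  rw [e3, e2, e1]
  have h3 : n % 16 / 8 % 2 = 0 ∨ n % 16 / 8 % 2 = 1 := by omega
  have h2 : n % 16 / 4 % 2 = 0 ∨ n % 16 / 4 % 2 = 1 := by omega
  have h1 : n % 16 / 2 % 2 = 0 ∨ n % 16 / 2 % 2 = 1 := by omega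
  have h0 : n % 2 = 0 ∨ n % 2 = 1 := by omega
  rcases h3 with h3 | h3 <;> rcases h2 with h2 | h2 <;> rcases h1 with h1 | h1 <;>
    rcases h0 with h0 | h0 <;> simp [h3, h2, h1, h0] <;> decide

-- ===== VERDICT (by name: the statement is the Claim_ definition above) =====
theorem binmaker_spec : Claim_equal_binmaker := by
  intro N _ _
  unfold Spec_binmaker binmaker binmaker_alt
  exact pvLoop_eq_fmt _
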